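-- pv_equiv track=rewrite | github.com/dndnda/wikidata_clean | clean.py | normalize_punctuation
-- ===== SOURCE A (Python) =====
-- def normalize_punctuation(text):
--     """
--     统一使用中文标点符号
--     """
--     trans_dict = {
--         ',': '，',
--         '?': '？',
--         '!': '！',
--         ':': '：',
--         ';': '；',
--         '(': '（',
--         ')': '）',
--         '...': '……'
--     }
--     for eng_punct, zh_punct in trans_dict.items():
--         text = text.replace(eng_punct, zh_punct)
--     return text
-- ===== SOURCE B (Python) =====
-- def normalize_punctuation(text):
--     """
--     统一使用中文标点符号
--     """
--     char_map = {
--         ',': '，',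
--         '?': '？',
--         '!': '！',
--         ':': '：',
--         ';': '；',
--         '(': '（',
--         ')': '）',
--     }
--     out = []
--     i = 0
--     n = len(text)
--     while i < n:
--         if text.startswith('...', i):
--             out.append('……')
--             i += 3
--         else:
--             c = text[i]
--             out.append(char_map.get(c, c))
--             i += 1
--     return ''.join(out)
-- ===== Notes on version B (the rewrite author's own statement) =====
-- stated objective: faster
-- what changed: Replaced eight full-string replace passes (each allocating a new string) with a single left-to-right scan that handles the '...' lookahead and a one-character dict lookup per position.
import Mathlib
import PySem

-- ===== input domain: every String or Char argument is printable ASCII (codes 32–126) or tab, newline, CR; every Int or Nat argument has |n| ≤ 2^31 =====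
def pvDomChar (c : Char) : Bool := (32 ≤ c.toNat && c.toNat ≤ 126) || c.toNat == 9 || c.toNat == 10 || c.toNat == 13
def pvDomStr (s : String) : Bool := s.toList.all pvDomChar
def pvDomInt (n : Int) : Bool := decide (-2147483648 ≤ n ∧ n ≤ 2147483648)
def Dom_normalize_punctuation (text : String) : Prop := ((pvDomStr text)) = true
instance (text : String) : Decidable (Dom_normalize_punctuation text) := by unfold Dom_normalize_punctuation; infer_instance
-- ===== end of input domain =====

-- B replaces A's eight sequential full-string replace passes by one left-to-right scan
-- with a '...' lookahead and a per-character dict lookup (objective: faster, constant factor).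
-- ===== PORT A =====
def pvTransDict : PySem.Dict String String :=
  PySem.Dict.ofList [(",", "，"), ("?", "？"), ("!", "！"), (":", "："),
                     (";", "；"), ("(", "（"), (")", "）"), ("...", "……")]

def normalize_punctuation (text : String) : String :=
  pvTransDict.items.foldl (fun t p => PySem.Str.replace t p.1 p.2) text

-- ===== PORT B =====
def pvCharMap : PySem.Dict Char Char :=
  PySem.Dict.ofList [(',', '，'), ('?', '？'), ('!', '！'), (':', '：'),
                     (';', '；'), ('(', '（'), (')', '）')]

def pvScan : List Char → List Char
  | '.' :: '.' :: '.' :: rest => '…' :: '…' :: pvScan rest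
  | c :: rest => pvCharMap.getD c c :: pvScan rest
  | [] => []

def normalize_punctuation_alt (text : String) : String :=
  String.ofList (pvScan text.toList)

-- ===== PRECONDITION & SPEC =====
def Spec_normalize_punctuation (text : String) (out : String) : Prop := out = normalize_punctuation_alt text
instance (text : String) (out : String) : Decidable (Spec_normalize_punctuation text out) := by unfold Spec_normalize_punctuation; infer_instance

-- ===== CLAIM (what is proved, stated in full; the proofs are below) =====
def Claim_equal_normalize_punctuation : Prop := ∀ (text : String), Dom_normalize_punctuation text → Spec_normalize_punctuation text (normalize_punctuation text)

-- ===== LEMMAS AND PROOFS =====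

/-- Proof-side name for the single-character mapping B applies outside '...' runs. -/
def pvF (c : Char) : Char := pvCharMap.getD c c

lemma pvCharMap_mk : pvCharMap = PySem.Dict.mk
    [(',', '，'), ('?', '？'), ('!', '！'), (':', '：'),
     (';', '；'), ('(', '（'), (')', '）')] := by decide

lemma pvF_unmapped (x : Char) (h1 : ¬x = ',') (h2 : ¬x = '?') (h3 : ¬x = '!')
    (h4 : ¬x = ':') (h5 : ¬x = ';') (h6 : ¬x = '(') (h7 : ¬x = ')') : pvF x = x := by
  have n1 : (',' == x) = false := by simp; exact fun e => h1 e.symm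
  have n2 : ('?' == x) = false := by simp; exact fun e => h2 e.symm
  have n3 : ('!' == x) = false := by simp; exact fun e => h3 e.symm
  have n4 : (':' == x) = false := by simp; exact fun e => h4 e.symm
  have n5 : (';' == x) = false := by simp; exact fun e => h5 e.symm
  have n6 : ('(' == x) = false := by simp; exact fun e => h6 e.symm
  have n7 : (')' == x) = false := by simp; exact fun e => h7 e.symm
  rw [pvF, pvCharMap_mk]
  simp [PySem.Dict.getD, PySem.Dict.get?, n1, n2, n3, n4, n5, n6, n7]

lemma pvF_eq_dot_iff (x : Char) : pvF x = '.' ↔ x = '.' := by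
  constructor
  · intro h
    by_cases h1 : x = ','; · subst h1; exact absurd h (by decide)
    by_cases h2 : x = '?'; · subst h2; exact absurd h (by decide)
    by_cases h3 : x = '!'; · subst h3; exact absurd h (by decide)
    by_cases h4 : x = ':'; · subst h4; exact absurd h (by decide)
    by_cases h5 : x = ';'; · subst h5; exact absurd h (by decide)
    by_cases h6 : x = '('; · subst h6; exact absurd h (by decide)
    by_cases h7 : x = ')'; · subst h7; exact absurd h (by decide)
    rw [pvF_unmapped x h1 h2 h3 h4 h5 h6 h7] at h
    exact h
  · intro h; subst h; rfl

/-- Single-character replace is a character map. -/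
lemma go_single (c d : Char) : ∀ (fuel : Nat) (l acc : List Char), l.length ≤ fuel →
    PySem.Chars.replace.go [c] [d] fuel l acc = acc.reverse ++ l.map (fun x => if x = c then d else x) := by
  intro fuel
  induction fuel with
  | zero => intro l acc h; cases l with
    | nil => simp [PySem.Chars.replace.go]
    | cons a t => simp at h
  | succ k ih =>
    intro l acc h
    cases l with
    | nil => simp [PySem.Chars.replace.go]
    | cons a t =>
      rw [PySem.Chars.replace.go]
      by_cases hac : a = c
      · subst hac
        simp only [List.isPrefixOf, BEq.rfl, Bool.true_and, if_true,
                   List.length_cons, List.length_nil, List.drop_succ_cons, List.drop_zero,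
                   List.reverse_singleton]
        simp only [List.singleton_append]
        rw [ih t (d :: acc) (by simpa using Nat.le_of_succ_le_succ h)]
        simp
      · have hno : List.isPrefixOf [c] (a :: t) = false := by
          simp [List.isPrefixOf]; exact fun h' => absurd h'.symm hac
        rw [hno]
        simp only [if_false, Bool.false_eq_true]
        rw [ih t (a :: acc) (by simpa using Nat.le_of_succ_le_succ h)]
        simp [hac]

lemma replace_single (c d : Char) (l : List Char) :
    PySem.Chars.replace l [c] [d] = l.map (fun x => if x = c then d else x) := by
  rw [PySem.Chars.replace]
  simp only [List.isEmpty_cons, Bool.false_eq_true, if_false]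
  exact go_single c d l.length l [] (le_refl _)

lemma pvScan_cons (c : Char) (rest : List Char)
    (hne : ∀ r, c = '.' → rest = '.' :: '.' :: r → False) :
    pvScan (c :: rest) = pvCharMap.getD c c :: pvScan rest := by
  rw [pvScan.eq_def]
  split
  · rename_i r' heq
    injection heq with hc hr
    exact (hne r' hc hr).elim
  · rename_i c2 r2 _ heq
    injection heq with hc hr
    subst hc; subst hr; rfl
  · rename_i heq; exact absurd heq (by simp)

/-- The '...' → '……' replace pass, applied after the seven character maps, is B's scan. -/
lemma go_dots : ∀ (s : List Char) (fuel : Nat) (acc : List Char), s.length ≤ fuel →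
    PySem.Chars.replace.go ['.', '.', '.'] ['…', '…'] fuel (s.map pvF) acc = acc.reverse ++ pvScan s := by
  intro s
  induction s using pvScan.induct with
  | case1 rest ih =>
    intro fuel acc h
    cases fuel with
    | zero => simp at h
    | succ k =>
      have hd : pvF '.' = '.' := rfl
      simp only [List.map_cons, hd]
      rw [PySem.Chars.replace.go]
      simp only [List.isPrefixOf, BEq.rfl, Bool.true_and, if_true]
      rw [show List.drop ['.','.','.'].length ('.' :: '.' :: '.' :: rest.map pvF) = rest.map pvF from rfl]
      rw [ih k ((['…','…'] : List Char).reverse ++ acc) (by simp at h ⊢; omega)]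
      simp [pvScan]
  | case2 c rest hne ih =>
    intro fuel acc h
    cases fuel with
    | zero => simp at h
    | succ k =>
      simp only [List.map_cons]
      rw [PySem.Chars.replace.go]
      have hpre : List.isPrefixOf ['.','.','.'] (pvF c :: rest.map pvF) = false := by
        by_contra hcon
        have hp : List.isPrefixOf ['.','.','.'] (pvF c :: rest.map pvF) = true := by
          cases hx : List.isPrefixOf ['.','.','.'] (pvF c :: rest.map pvF) <;> simp_all
        rw [List.isPrefixOf_iff_prefix] at hp
        obtain ⟨r, hr⟩ := hp
        cases rest with
        | nil => simp at hr
        | cons b rest2 =>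
          cases rest2 with
          | nil => simp at hr
          | cons e rest3 =>
            simp only [List.map_cons, List.cons_append] at hr
            have h1 : pvF c = '.' := by injection hr with h' _; exact h'.symm
            have h2 : pvF b = '.' := by
              injection hr with _ hr'; injection hr' with h' _; exact h'.symm
            have h3 : pvF e = '.' := by
              injection hr with _ hr'; injection hr' with _ hr''
              injection hr'' with h' _; exact h'.symm
            rw [pvF_eq_dot_iff] at h1 h2 h3
            subst h1; subst h2; subst h3
            exact hne rest3 rfl rfl
      rw [hpre]
      simp only [Bool.false_eq_true, if_false]
      rw [ih k (pvF c :: acc) (by simp at h ⊢; omega)]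
      rw [pvScan_cons c rest (fun r hc hr => hne r hc hr)]
      simp [pvF]
  | case3 =>
    intro fuel acc h
    cases fuel with
    | zero => simp [PySem.Chars.replace.go, pvScan]
    | succ k => simp [PySem.Chars.replace.go, pvScan]

set_option maxHeartbeats 1000000 in
lemma seven_maps (l : List Char) :
    ((((((l.map (fun x => if x = ',' then '，' else x)).map
         (fun x => if x = '?' then '？' else x)).map
         (fun x => if x = '!' then '！' else x)).map
         (fun x => if x = ':' then '：' else x)).map
         (fun x => if x = ';' then '；' else x)).map
         (fun x => if x = '(' then '（' else x)).map
         (fun x => if x = ')' then '）' else x) = l.map pvF := by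
  simp only [List.map_map]
  apply List.map_congr_left
  intro x _
  by_cases h1 : x = ','; · subst h1; rfl
  by_cases h2 : x = '?'; · subst h2; rfl
  by_cases h3 : x = '!'; · subst h3; rfl
  by_cases h4 : x = ':'; · subst h4; rfl
  by_cases h5 : x = ';'; · subst h5; rfl
  by_cases h6 : x = '('; · subst h6; rfl
  by_cases h7 : x = ')'; · subst h7; rfl
  simp only [Function.comp_apply, h1, h2, h3, h4, h5, h6, h7, if_false]
  rw [pvF_unmapped x h1 h2 h3 h4 h5 h6 h7]

set_option maxHeartbeats 1000000 in
lemma A_toList (text : String) :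
    (normalize_punctuation text).toList =
      PySem.Chars.replace ((text.toList).map pvF) ['.', '.', '.'] ['…', '…'] := by
  have hA : normalize_punctuation text =
      PySem.Str.replace (PySem.Str.replace (PySem.Str.replace (PySem.Str.replace
        (PySem.Str.replace (PySem.Str.replace (PySem.Str.replace (PySem.Str.replace
          text "," "，") "?" "？") "!" "！") ":" "：") ";" "；") "(" "（") ")" "）") "..." "……" := rfl
  rw [hA]
  simp only [PySem.Str.toList_replace]
  rw [show ("," : String).toList = [','] from rfl, show ("，" : String).toList = ['，'] from rfl,
      show ("?" : String).toList = ['?'] from rfl, show ("？" : String).toList = ['？'] from rfl,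
      show ("!" : String).toList = ['!'] from rfl, show ("！" : String).toList = ['！'] from rfl,
      show (":" : String).toList = [':'] from rfl, show ("：" : String).toList = ['：'] from rfl,
      show (";" : String).toList = [';'] from rfl, show ("；" : String).toList = ['；'] from rfl,
      show ("(" : String).toList = ['('] from rfl, show ("（" : String).toList = ['（'] from rfl,
      show (")" : String).toList = [')'] from rfl, show ("）" : String).toList = ['）'] from rfl,
      show ("..." : String).toList = ['.', '.', '.'] from rfl,
      show ("……" : String).toList = ['…', '…'] from rfl]
  rw [replace_single, replace_single, replace_single, replace_single,
      replace_single, replace_single, replace_single]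
  rw [seven_maps]

-- ===== VERDICT (by name: the statement is the Claim_ definition above) =====
theorem normalize_punctuation_spec : Claim_equal_normalize_punctuation := by
  intro text _
  unfold Spec_normalize_punctuation normalize_punctuation_alt
  have h1 : (normalize_punctuation text).toList = pvScan text.toList := by
    rw [A_toList]
    rw [PySem.Chars.replace]
    simp only [List.isEmpty_cons, Bool.false_eq_true, if_false]
    exact go_dots text.toList ((text.toList.map pvF).length) [] (by simp)
  calc normalize_punctuation text = String.ofList (normalize_punctuation text).toList := by
        simp
    _ = String.ofList (pvScan text.toList) := by rw [h1]
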